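-- pv_equiv track=rewrite | github.com/Olympe19100/FF-trade | research/returns.py | find_date_before
-- ===== SOURCE A (Python) =====
-- def find_date_before(target_int, avail_dates, min_gap=1, max_gap=5):
--     """Find the trading day 1 day before target (for closing before expiry)."""
--     best, best_diff = None, 999999
--     for d in avail_dates:
--         diff = target_int - d  # positive = d is before target
--         if min_gap <= diff <= max_gap and diff < best_diff:
--             best_diff = diff
--             best = d
--     return best
-- ===== SOURCE B (Python) =====
-- def find_date_before(target_int, avail_dates, min_gap=1, max_gap=5):
--     """Find the trading day 1 day before target (for closing before expiry)."""
--     for d in sorted(avail_dates, reverse=True):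
--         if min_gap <= target_int - d <= max_gap:
--             return d
--     return None
-- ===== Notes on version B (the rewrite author's own statement) =====
-- stated objective: alternative
-- what changed: Sort the dates descending once, then early-return the first date that falls in the gap window (first in-window date of the descending order = nearest earlier date), instead of a single pass maintaining best/best_diff with a 999999 sentinel.
-- intended difference: When some date lies in the gap window but every in-window gap is at least 999999 (A's sentinel), A returns None although valid dates exist, while B returns the nearest such date, which is the intended value. — e.g. on find_date_before(0, [-999999], 1, 1000000): A returns none, B returns some (-999999)
import Mathlib
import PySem

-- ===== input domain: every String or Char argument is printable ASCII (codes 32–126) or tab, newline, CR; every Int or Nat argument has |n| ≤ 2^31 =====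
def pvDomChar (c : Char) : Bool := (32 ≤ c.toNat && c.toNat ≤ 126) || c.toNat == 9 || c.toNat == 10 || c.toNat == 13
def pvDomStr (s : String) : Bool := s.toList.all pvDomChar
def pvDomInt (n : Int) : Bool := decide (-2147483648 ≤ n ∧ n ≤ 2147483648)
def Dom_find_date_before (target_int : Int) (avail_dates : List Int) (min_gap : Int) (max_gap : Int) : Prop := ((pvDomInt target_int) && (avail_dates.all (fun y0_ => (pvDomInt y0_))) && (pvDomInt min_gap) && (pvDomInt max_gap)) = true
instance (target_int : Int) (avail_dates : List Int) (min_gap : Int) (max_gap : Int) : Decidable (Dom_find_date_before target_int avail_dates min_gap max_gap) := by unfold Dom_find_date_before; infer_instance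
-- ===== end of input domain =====

-- B sorts the dates descending once and early-returns the first in-window date (= nearest
-- earlier date), dropping A's running best/best_diff tracker and its 999999 sentinel
-- (same return value outside D_ below; alternative decomposition, not claimed faster).

-- ===== PORT A =====
-- running best/best_diff loop, literal transliteration
def find_date_before (target_int : Int) (avail_dates : List Int) (min_gap : Int) (max_gap : Int) : Option Int :=
  (avail_dates.foldl
    (fun (st : Option Int × Int) d =>
      let diff := target_int - d
      if min_gap ≤ diff ∧ diff ≤ max_gap ∧ diff < st.2 then (some d, diff) else st)
    (none, 999999)).1

-- ===== PORT B =====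
-- sorted(avail_dates, reverse=True), then the first date in the window (early return), else None
def find_date_before_alt (target_int : Int) (avail_dates : List Int) (min_gap : Int) (max_gap : Int) : Option Int :=
  (PySem.List.sorted avail_dates (fun d => d) true).find?
    (fun d => decide (min_gap ≤ target_int - d) && decide (target_int - d ≤ max_gap))

-- ===== PRECONDITION & SPEC =====
-- When at least one date lies in the gap window but every in-window gap is ≥ 999999, A's
-- sentinel `best_diff = 999999` makes it return None although valid dates exist; B returns
-- the nearest such date, which is the intended value.
def D_find_date_before (target_int : Int) (avail_dates : List Int) (min_gap : Int) (max_gap : Int) : Prop :=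
  (∃ d ∈ avail_dates, min_gap ≤ target_int - d ∧ target_int - d ≤ max_gap) ∧
  (∀ d ∈ avail_dates, min_gap ≤ target_int - d → target_int - d ≤ max_gap → 999999 ≤ target_int - d)
instance (target_int : Int) (avail_dates : List Int) (min_gap : Int) (max_gap : Int) : Decidable (D_find_date_before target_int avail_dates min_gap max_gap) := by unfold D_find_date_before; infer_instance
def Spec_find_date_before (target_int : Int) (avail_dates : List Int) (min_gap : Int) (max_gap : Int) (out : Option Int) : Prop := ¬ D_find_date_before target_int avail_dates min_gap max_gap → out = find_date_before_alt target_int avail_dates min_gap max_gap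
instance (target_int : Int) (avail_dates : List Int) (min_gap : Int) (max_gap : Int) (out : Option Int) : Decidable (Spec_find_date_before target_int avail_dates min_gap max_gap out) := by unfold Spec_find_date_before; infer_instance
def pvDiffWitness_find_date_before : Int × List Int × Int × Int := (0, [-999999], 1, 1000000)
def pvDiffWitnessOut_find_date_before : (Option Int) × (Option Int) := (none, some (-999999))

-- ===== CLAIM (what is proved, stated in full; the proofs are below) =====
def Claim_unchanged_find_date_before : Prop := ∀ (target_int : Int) (avail_dates : List Int) (min_gap : Int) (max_gap : Int), Dom_find_date_before target_int avail_dates min_gap max_gap → Spec_find_date_before target_int avail_dates min_gap max_gap (find_date_before target_int avail_dates min_gap max_gap)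
def Claim_changed_find_date_before : Prop := Dom_find_date_before (pvDiffWitness_find_date_before.1) (pvDiffWitness_find_date_before.2.1) (pvDiffWitness_find_date_before.2.2.1) (pvDiffWitness_find_date_before.2.2.2) ∧ D_find_date_before (pvDiffWitness_find_date_before.1) (pvDiffWitness_find_date_before.2.1) (pvDiffWitness_find_date_before.2.2.1) (pvDiffWitness_find_date_before.2.2.2) ∧ find_date_before (pvDiffWitness_find_date_before.1) (pvDiffWitness_find_date_before.2.1) (pvDiffWitness_find_date_before.2.2.1) (pvDiffWitness_find_date_before.2.2.2) = pvDiffWitnessOut_find_date_before.1 ∧ find_date_before_alt (pvDiffWitness_find_date_before.1) (pvDiffWitness_find_date_before.2.1) (pvDiffWitness_find_date_before.2.2.1) (pvDiffWitness_find_date_before.2.2.2) = pvDiffWitnessOut_find_date_before.2 ∧ pvDiffWitnessOut_find_date_before.1 ≠ pvDiffWitnessOut_find_date_before.2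
def Claim_exact_find_date_before : Prop := ∀ (target_int : Int) (avail_dates : List Int) (min_gap : Int) (max_gap : Int), Dom_find_date_before target_int avail_dates min_gap max_gap → D_find_date_before target_int avail_dates min_gap max_gap → find_date_before target_int avail_dates min_gap max_gap ≠ find_date_before_alt target_int avail_dates min_gap max_gap

-- ===== LEMMAS AND PROOFS =====

-- the capped running minimum of in-window gaps that A's loop maintains in `best_diff`
def pvCap (t g1 g2 : Int) (ds : List Int) (m : Int) : Int :=
  ds.foldl (fun m d => if g1 ≤ t - d ∧ t - d ≤ g2 then min m (t - d) else m) m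

theorem pvLoop_char (t g1 g2 : Int) (ds : List Int) (b : Option Int) (m : Int)
    (hb : b = if m < 999999 then some (t - m) else none) (hm : m ≤ 999999) :
    ds.foldl
      (fun (st : Option Int × Int) d =>
        let diff := t - d
        if g1 ≤ diff ∧ diff ≤ g2 ∧ diff < st.2 then (some d, diff) else st)
      (b, m)
    = (if pvCap t g1 g2 ds m < 999999 then some (t - pvCap t g1 g2 ds m) else none,
       pvCap t g1 g2 ds m) := by
  induction ds generalizing b m with
  | nil => simp [pvCap, hb]
  | cons d ds ih =>
    simp only [List.foldl_cons, pvCap] at *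
    by_cases h1 : g1 ≤ t - d ∧ t - d ≤ g2
    · by_cases h2 : t - d < m
      · rw [if_pos ⟨h1.1, h1.2, h2⟩]
        have hmin : min m (t - d) = t - d := min_eq_right (le_of_lt h2)
        rw [if_pos h1, hmin]
        have := ih (some d) (t - d) (by rw [if_pos (lt_of_lt_of_le h2 hm)]; ring_nf) (le_of_lt (lt_of_lt_of_le h2 hm))
        simpa using this
      · rw [if_neg (by tauto)]
        have hmin : min m (t - d) = m := min_eq_left (le_of_not_gt h2)
        rw [if_pos h1, hmin]
        exact ih b m hb hm
    · rw [if_neg (by tauto), if_neg h1]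
      exact ih b m hb hm

theorem find_A_char (t : Int) (ds : List Int) (g1 g2 : Int) :
    find_date_before t ds g1 g2
    = (if pvCap t g1 g2 ds 999999 < 999999 then some (t - pvCap t g1 g2 ds 999999) else none) := by
  unfold find_date_before
  rw [pvLoop_char t g1 g2 ds none 999999 (by simp) le_rfl]

-- the capped minimum only looks at the filtered window
theorem pvCap_filter (t g1 g2 : Int) (ds : List Int) (m : Int) :
    pvCap t g1 g2 ds m
    = (ds.filter (fun d => decide (g1 ≤ t - d) && decide (t - d ≤ g2))).foldl
        (fun m d => min m (t - d)) m := by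
  induction ds generalizing m with
  | nil => simp [pvCap]
  | cons d ds ih =>
    simp only [pvCap, List.foldl_cons, List.filter_cons] at *
    by_cases h : g1 ≤ t - d ∧ t - d ≤ g2
    · rw [if_pos h]
      have : (decide (g1 ≤ t - d) && decide (t - d ≤ g2)) = true := by
        simp [h.1, h.2]
      rw [this]
      exact ih (min m (t - d))
    · rw [if_neg h]
      have : (decide (g1 ≤ t - d) && decide (t - d ≤ g2)) = false := by
        rcases not_and_or.mp h with h' | h' <;> simp [h']
      rw [this]
      exact ih m

theorem pvFoldMin_neg_max (t w : Int) (ws : List Int) :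
    ws.foldl (fun m d => min m (t - d)) (t - w) = t - ws.foldl max w := by
  induction ws generalizing w with
  | nil => simp
  | cons x ws ih =>
    simp only [List.foldl_cons]
    rw [show min (t - w) (t - x) = t - max w x by
      rcases le_total w x with h | h
      · rw [max_eq_right h, min_eq_right (by omega)]
      · rw [max_eq_left h, min_eq_left (by omega)]]
    exact ih (max w x)

theorem window_mem_window (t g1 g2 : Int) (ds : List Int) (d : Int)
    (hd : d ∈ ds.filter (fun d => decide (g1 ≤ t - d) && decide (t - d ≤ g2))) :
    g1 ≤ t - d ∧ t - d ≤ g2 := by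
  have := List.of_mem_filter hd
  simp at this
  exact ⟨this.1, by omega⟩

theorem pvFold_min_init (t a b : Int) (l : List Int) :
    l.foldl (fun m d => min m (t - d)) (min a b) = min a (l.foldl (fun m d => min m (t - d)) b) := by
  induction l generalizing b with
  | nil => simp
  | cons x l ih =>
    simp only [List.foldl_cons]
    rw [min_assoc]
    exact ih (min b (t - x))

theorem pvWindow_char (t : Int) (ds : List Int) (g1 g2 : Int) :
    pvCap t g1 g2 ds 999999
    = (match ds.filter (fun d => decide (g1 ≤ t - d) && decide (t - d ≤ g2)) with
       | [] => (999999 : Int)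
       | w :: ws => min 999999 (t - ws.foldl max w)) := by
  rw [pvCap_filter]
  match hw : ds.filter (fun d => decide (g1 ≤ t - d) && decide (t - d ≤ g2)) with
  | [] => simp
  | w :: ws =>
    simp only [List.foldl_cons]
    rw [pvFold_min_init t 999999 (t - w) ws, pvFoldMin_neg_max]

-- find? is the head of the filter
theorem pvFind_eq_head_filter {α : Type} (p : α → Bool) (l : List α) :
    l.find? p = (l.filter p).head? := by
  induction l with
  | nil => simp
  | cons x l ih =>
    by_cases h : p x
    · simp [List.find?_cons, List.filter_cons, h]
    · simp only [List.find?_cons, List.filter_cons]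
      rw [Bool.eq_false_iff.mpr h]
      simpa using ih

-- B's value is the maximum of the window (first in-window date of the descending order)
theorem pvAlt_char (t : Int) (ds : List Int) (g1 g2 : Int) :
    find_date_before_alt t ds g1 g2
    = (match ds.filter (fun d => decide (g1 ≤ t - d) && decide (t - d ≤ g2)) with
       | [] => none
       | w :: ws => some (ws.foldl max w)) := by
  unfold find_date_before_alt
  rw [pvFind_eq_head_filter]
  have hperm : (PySem.List.sorted ds (fun d => d) true).Perm ds := PySem.List.sorted_perm ds _ true
  have hfp : ((PySem.List.sorted ds (fun d => d) true).filter
      (fun d => decide (g1 ≤ t - d) && decide (t - d ≤ g2))).Perm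
      (ds.filter (fun d => decide (g1 ≤ t - d) && decide (t - d ≤ g2))) := hperm.filter _
  match hw : ds.filter (fun d => decide (g1 ≤ t - d) && decide (t - d ≤ g2)) with
  | [] =>
    rw [hw] at hfp
    rw [List.Perm.eq_nil hfp]
    simp
  | w :: ws =>
    rw [hw] at hfp
    match hs : (PySem.List.sorted ds (fun d => d) true).filter
        (fun d => decide (g1 ≤ t - d) && decide (t - d ≤ g2)) with
    | [] => rw [hs] at hfp; exact absurd (List.Perm.eq_nil hfp.symm) (by simp)
    | h :: tl =>
      rw [hs] at hfp
      simp only [List.head?_cons]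
      set mx := ws.foldl max w with hmx
      -- h is the head of the descending-sorted filter, hence an upper bound of the window
      have hpair : (PySem.List.sorted ds (fun d => d) true).Pairwise (fun a b => b ≤ a) :=
        PySem.List.sorted_pairwise_rev ds (fun d => d)
      have hpairf : (h :: tl).Pairwise (fun a b : Int => b ≤ a) := by
        rw [← hs]; exact hpair.sublist List.filter_sublist
      have hub : ∀ x ∈ tl, x ≤ h := (List.pairwise_cons.mp hpairf).1
      -- mx ∈ window (original), hence (via Perm) mx ∈ h :: tl, so mx ≤ h
      have hmxmem : mx ∈ w :: ws := by
        rcases PySem.List.foldl_max_mem ws w with hc | hc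
        · rw [hmx, hc]; exact List.mem_cons_self
        · exact List.mem_cons_of_mem _ hc
      have hmxh : mx ≤ h := by
        have : mx ∈ h :: tl := hfp.mem_iff.mpr hmxmem
        rcases List.mem_cons.mp this with h' | h'
        · omega
        · exact hub mx h'
      -- h ∈ window, so h ≤ mx
      have hhmem : h ∈ w :: ws := hfp.mem_iff.mp List.mem_cons_self
      have hhmx : h ≤ mx := by
        rcases List.mem_cons.mp hhmem with h' | h'
        · rw [h']; exact (PySem.List.le_foldl_max ws w).1
        · exact (PySem.List.le_foldl_max ws w).2 h h'
      have : h = mx := le_antisymm hhmx hmxh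
      rw [this]

theorem pvWindow_nil (t : Int) (ds : List Int) (g1 g2 : Int)
    (h : ds.filter (fun d => decide (g1 ≤ t - d) && decide (t - d ≤ g2)) = []) :
    pvCap t g1 g2 ds 999999 = 999999 := by
  rw [pvWindow_char, h]

theorem pvWindow_cons (t : Int) (ds : List Int) (g1 g2 : Int) (w : Int) (ws : List Int)
    (h : ds.filter (fun d => decide (g1 ≤ t - d) && decide (t - d ≤ g2)) = w :: ws) :
    pvCap t g1 g2 ds 999999 = min 999999 (t - ws.foldl max w) := by
  rw [pvWindow_char, h]

theorem pvAlt_nil (t : Int) (ds : List Int) (g1 g2 : Int)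
    (h : ds.filter (fun d => decide (g1 ≤ t - d) && decide (t - d ≤ g2)) = []) :
    find_date_before_alt t ds g1 g2 = none := by
  rw [pvAlt_char, h]

theorem pvAlt_cons (t : Int) (ds : List Int) (g1 g2 : Int) (w : Int) (ws : List Int)
    (h : ds.filter (fun d => decide (g1 ≤ t - d) && decide (t - d ≤ g2)) = w :: ws) :
    find_date_before_alt t ds g1 g2 = some (ws.foldl max w) := by
  rw [pvAlt_char, h]

theorem pvMain (t : Int) (ds : List Int) (g1 g2 : Int)
    (hnd : ¬ D_find_date_before t ds g1 g2) :
    find_date_before t ds g1 g2 = find_date_before_alt t ds g1 g2 := by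
  match hw : ds.filter (fun d => decide (g1 ≤ t - d) && decide (t - d ≤ g2)) with
  | [] => rw [find_A_char, pvWindow_nil t ds g1 g2 hw, pvAlt_nil t ds g1 g2 hw]; simp
  | w :: ws =>
    rw [find_A_char, pvWindow_cons t ds g1 g2 w ws hw, pvAlt_cons t ds g1 g2 w ws hw]
    set mx := ws.foldl max w with hmx
    have hwmem : w ∈ ds ∧ (g1 ≤ t - w ∧ t - w ≤ g2) := by
      have h1 : w ∈ ds.filter (fun d => decide (g1 ≤ t - d) && decide (t - d ≤ g2)) := by
        rw [hw]; exact List.mem_cons_self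
      exact ⟨List.mem_of_mem_filter h1, window_mem_window t g1 g2 ds w h1⟩
    have hex : ∃ d ∈ ds, (g1 ≤ t - d ∧ t - d ≤ g2) ∧ t - d < 999999 := by
      unfold D_find_date_before at hnd
      push Not at hnd
      rcases hnd ⟨w, hwmem.1, hwmem.2⟩ with ⟨d, hdm, h1, h2, h3⟩
      exact ⟨d, hdm, ⟨h1, h2⟩, h3⟩
    rcases hex with ⟨d, hdm, hdv, hdlt⟩
    have hdw : d ∈ ds.filter (fun d => decide (g1 ≤ t - d) && decide (t - d ≤ g2)) := by
      refine List.mem_filter.mpr ⟨hdm, ?_⟩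
      simp [hdv.1, hdv.2]
    rw [hw] at hdw
    have hle : d ≤ mx := by
      rcases List.mem_cons.mp hdw with h | h
      · exact h ▸ (PySem.List.le_foldl_max ws w).1
      · exact (PySem.List.le_foldl_max ws w).2 d h
    have hlt : t - mx < 999999 := by omega
    rw [min_eq_right (le_of_lt hlt), if_pos hlt]
    congr 1
    omega

-- ===== VERDICT (by name: the statement is the Claim_ definition above) =====
theorem find_date_before_spec : Claim_unchanged_find_date_before := by
  intro t ds g1 g2 _ hnd
  exact pvMain t ds g1 g2 hnd

theorem find_date_before_changed : Claim_changed_find_date_before := by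
  unfold Claim_changed_find_date_before; decide

theorem find_date_before_tight : Claim_exact_find_date_before := by
  intro t ds g1 g2 _ hd
  rcases hd with ⟨⟨d, hdm, hdv⟩, hall⟩
  have hdw : d ∈ ds.filter (fun d => decide (g1 ≤ t - d) && decide (t - d ≤ g2)) := by
    refine List.mem_filter.mpr ⟨hdm, ?_⟩
    simp [hdv.1, hdv.2]
  match hw : ds.filter (fun d => decide (g1 ≤ t - d) && decide (t - d ≤ g2)) with
  | [] => rw [hw] at hdw; exact absurd hdw (List.not_mem_nil)
  | w :: ws =>
    rw [find_A_char, pvWindow_cons t ds g1 g2 w ws hw, pvAlt_cons t ds g1 g2 w ws hw]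
    set mx := ws.foldl max w with hmx
    have hmxw : mx ∈ ds.filter (fun d => decide (g1 ≤ t - d) && decide (t - d ≤ g2)) := by
      rw [hw]
      rcases PySem.List.foldl_max_mem ws w with h | h
      · rw [hmx, h]; exact List.mem_cons_self
      · exact List.mem_cons_of_mem _ h
    have hmxv := window_mem_window t g1 g2 ds mx hmxw
    have hge : 999999 ≤ t - mx :=
      hall mx (List.mem_of_mem_filter hmxw) hmxv.1 hmxv.2
    rw [min_eq_left hge, if_neg (by omega)]
    simp
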